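-- pv_equiv track=rewrite | github.com/MoeFourtyTwo/advent-of-code | aoc/tasks/year_2024/day_07/part_1.py | eval_calibration
-- ===== SOURCE A (Python) =====
-- import operator
--
-- def eval_calibration(target: int, current: int, operands: list[int]) -> bool:
--     if len(operands) == 0:
--         return target == current
--
--     if target < calc_lower_bound(current, operands):
--         return False
--
--     if target > calc_upper_bound(current, operands):
--         return False
--
--     for op in [operator.add, operator.mul]:
--         if eval_calibration(target, op(current, operands[0]), operands[1:]):
--             return True
--
--     return False
--
-- def calc_upper_bound(current: int, operands: list[int]) -> int:
--     for operand in operands: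
--         current = max(current + operand, current * operand)
--     return current
--
-- def calc_lower_bound(current: int, operands: list[int]) -> int:
--     for operand in operands:
--         current = min(current + operand, current * operand)
--     return current
-- ===== SOURCE B (Python) =====
-- def eval_calibration(target: int, current: int, operands: list[int]) -> bool:
--     stack = [(current, operands)]
--     while stack:
--         cur, ops = stack.pop()
--         if not ops:
--             if target == cur:
--                 return True
--             continue
--         if target < calc_lower_bound(cur, ops):
--             continue
--         if target > calc_upper_bound(cur, ops):
--             continue
--         stack.append((cur * ops[0], ops[1:]))
--         stack.append((cur + ops[0], ops[1:]))
--     return False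
--
-- def calc_upper_bound(current: int, operands: list[int]) -> int:
--     for operand in operands:
--         current = max(current + operand, current * operand)
--     return current
--
-- def calc_lower_bound(current: int, operands: list[int]) -> int:
--     for operand in operands:
--         current = min(current + operand, current * operand)
--     return current
-- ===== Notes on version B (the rewrite author's own statement) =====
-- stated objective: alternative
-- what changed: Replaces A's recursion with an explicit DFS worklist/stack of (current, operands) states, popping states in a loop and pushing the mul- then add-children, while keeping the identical lower/upper-bound pruning.
import Mathlib
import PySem

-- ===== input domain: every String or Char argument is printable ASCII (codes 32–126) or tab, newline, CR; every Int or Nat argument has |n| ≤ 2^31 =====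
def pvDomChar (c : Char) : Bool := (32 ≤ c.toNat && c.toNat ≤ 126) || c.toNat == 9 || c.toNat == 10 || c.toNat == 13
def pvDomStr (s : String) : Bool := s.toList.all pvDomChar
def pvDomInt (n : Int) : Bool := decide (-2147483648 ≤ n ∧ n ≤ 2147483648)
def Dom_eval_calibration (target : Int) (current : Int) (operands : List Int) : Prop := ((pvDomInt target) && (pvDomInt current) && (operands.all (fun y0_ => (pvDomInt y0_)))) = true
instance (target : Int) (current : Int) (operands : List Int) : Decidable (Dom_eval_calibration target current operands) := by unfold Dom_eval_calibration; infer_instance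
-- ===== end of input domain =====

-- B replaces A's recursion with an explicit DFS worklist/stack of (current, operands)
-- states with the identical lower/upper-bound pruning (objective: alternative decomposition).

-- ===== PORT A =====
def calc_upper_bound (current : Int) (operands : List Int) : Int :=
  operands.foldl (fun cur operand => max (cur + operand) (cur * operand)) current

def calc_lower_bound (current : Int) (operands : List Int) : Int :=
  operands.foldl (fun cur operand => min (cur + operand) (cur * operand)) current

def eval_calibration (target : Int) (current : Int) (operands : List Int) : Bool :=
  match operands with
  | [] => target == current
  | o :: tl =>
    if target < calc_lower_bound current (o :: tl) then false
    else if target > calc_upper_bound current (o :: tl) then false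
    -- for-loop over [operator.add, operator.mul], returning on the first success
    else if eval_calibration target (current + o) tl then true
    else if eval_calibration target (current * o) tl then true
    else false

-- ===== PORT B =====
-- head of the list = top of the Python stack (list.pop()/append at the end)
def pvStackLoop (target : Int) (stack : List (Int × List Int)) : Bool :=
  match stack with
  | [] => false
  | (cur, ops) :: rest =>
    match ops with
    | [] => if target == cur then true else pvStackLoop target rest
    | o :: tl =>
      if target < calc_lower_bound cur (o :: tl) then pvStackLoop target rest
      else if target > calc_upper_bound cur (o :: tl) then pvStackLoop target rest
      else pvStackLoop target ((cur + o, tl) :: (cur * o, tl) :: rest)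
termination_by (stack.map (fun s => 3 ^ s.2.length)).sum
decreasing_by
  all_goals simp [pow_succ]
  all_goals (have := Nat.one_le_pow tl.length 3 (by norm_num); omega)

def eval_calibration_alt (target : Int) (current : Int) (operands : List Int) : Bool :=
  pvStackLoop target [(current, operands)]

-- ===== PRECONDITION & SPEC =====
def Spec_eval_calibration (target : Int) (current : Int) (operands : List Int) (out : Bool) : Prop := out = eval_calibration_alt target current operands
instance (target : Int) (current : Int) (operands : List Int) (out : Bool) : Decidable (Spec_eval_calibration target current operands out) := by unfold Spec_eval_calibration; infer_instance

-- ===== CLAIM (what is proved, stated in full; the proofs are below) =====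
def Claim_equal_eval_calibration : Prop := ∀ (target : Int) (current : Int) (operands : List Int), Dom_eval_calibration target current operands → Spec_eval_calibration target current operands (eval_calibration target current operands)

-- ===== LEMMAS AND PROOFS =====
-- The stack loop computes "some state on the stack evaluates (à la A) to true".
lemma pvStackLoop_eq_any (target : Int) (stack : List (Int × List Int)) :
    pvStackLoop target stack = stack.any (fun s => eval_calibration target s.1 s.2) := by
  induction stack using pvStackLoop.induct target with
  | case1 => simp [pvStackLoop]
  | case2 cur rest h =>
      simp [pvStackLoop, eval_calibration, h]
  | case3 cur rest h ih =>
      simp [pvStackLoop, eval_calibration, h, ih]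
  | case4 cur rest o tl h ih =>
      simp [pvStackLoop, eval_calibration, h, ih]
  | case5 cur rest o tl h1 h2 ih =>
      simp [pvStackLoop, eval_calibration, h1, h2, ih]
  | case6 cur rest o tl h1 h2 ih =>
      simp [pvStackLoop, eval_calibration, h1, h2, ih]
      cases eval_calibration target (cur + o) tl <;>
        cases eval_calibration target (cur * o) tl <;> simp

-- ===== VERDICT (by name: the statement is the Claim_ definition above) =====
theorem eval_calibration_spec : Claim_equal_eval_calibration := by
  intro target current operands _
  unfold Spec_eval_calibration eval_calibration_alt
  rw [pvStackLoop_eq_any]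
  simp
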